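-- pv_equiv track=rewrite | github.com/zhanglab/psamm | psamm/util.py | create_unique_id
-- ===== SOURCE A (Python) =====
-- def create_unique_id(prefix, existing_ids):
--     """Return a unique string ID from the prefix.
--
--     First check if the prefix is itself a unique ID in the set-like parameter
--     existing_ids. If not, try integers in ascending order appended to the
--     prefix until a unique ID is found.
--     """
--     if prefix in existing_ids:
--         suffix = 1
--         while True:
--             new_id = '{}_{}'.format(prefix, suffix)
--             if new_id not in existing_ids:
--                 return new_id
--             suffix += 1
--
--     return prefix
-- ===== SOURCE B (Python) =====
-- def create_unique_id(prefix, existing_ids):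
--     """Return a unique string ID from the prefix.
--
--     Invert the search: scan existing_ids once, collecting the suffix part of
--     every id of the form prefix + '_' + suffix into a set, then find the
--     first free numeral recursively; existing_ids is never consulted again
--     and candidate ids are never re-formatted per trial.
--     """
--     if prefix not in existing_ids:
--         return prefix
--     tag = prefix + '_'
--     used = {s[len(tag):] for s in existing_ids if s.startswith(tag)}
--
--     def free_id(k):
--         c = str(k)
--         return tag + c if c not in used else free_id(k + 1)
--
--     return free_id(1)
-- ===== Notes on version B (the rewrite author's own statement) =====
-- stated objective: alternative
-- what changed: Inverts the search: one pass over existing_ids extracts the suffix of every id of the form prefix+'_'+x into a set, then a recursive helper finds the first free bare numeral, so candidate ids are never re-formatted and existing_ids is never rescanned per trial (A's while-True formats prefix_k and tests the raw collection each iteration).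
import Mathlib
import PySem

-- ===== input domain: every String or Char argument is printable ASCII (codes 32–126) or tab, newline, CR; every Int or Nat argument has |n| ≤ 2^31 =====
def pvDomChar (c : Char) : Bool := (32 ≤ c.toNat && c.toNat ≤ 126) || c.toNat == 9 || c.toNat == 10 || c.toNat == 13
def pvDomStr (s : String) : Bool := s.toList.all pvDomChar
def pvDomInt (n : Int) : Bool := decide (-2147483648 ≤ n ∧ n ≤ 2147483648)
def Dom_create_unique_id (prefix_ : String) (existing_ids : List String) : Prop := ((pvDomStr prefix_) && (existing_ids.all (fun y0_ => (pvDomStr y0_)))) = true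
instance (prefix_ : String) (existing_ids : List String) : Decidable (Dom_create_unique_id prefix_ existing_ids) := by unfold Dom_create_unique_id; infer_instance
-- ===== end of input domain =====

-- B inverts the search: one pass extracts the suffixes of ids shaped prefix+'_'+x into a set,
-- then a recursive helper finds the first free bare numeral (alternative decomposition; return value only).

-- ===== PORT A =====
-- A's while-True loop; the fuel existing_ids.length+1 is a totality guard only (among the
-- first length+1 candidates one is always free, so the fuel-0 branch is never reached in Python).
def create_unique_id_loop (prefix_ : String) (existing_ids : List String) : Nat → Int → String
  | 0, _ => ""
  | fuel + 1, suffix =>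
      let new_id := prefix_ ++ "_" ++ PySem.Int.toStr suffix
      if existing_ids.contains new_id then
        create_unique_id_loop prefix_ existing_ids fuel (suffix + 1)
      else
        new_id

def create_unique_id (prefix_ : String) (existing_ids : List String) : String :=
  if existing_ids.contains prefix_ then
    create_unique_id_loop prefix_ existing_ids (existing_ids.length + 1) 1
  else
    prefix_

-- ===== PORT B =====
-- Source B's recursive free_id helper; same fuel totality guard as A's loop (never reached in Python).
def create_unique_id_free_id (tag : String) (used : PySem.Set String) : Nat → Int → String
  | 0, _ => ""
  | fuel + 1, k =>
      let c := PySem.Int.toStr k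
      if PySem.Set.contains used c = false then
        tag ++ c
      else
        create_unique_id_free_id tag used fuel (k + 1)

def create_unique_id_alt (prefix_ : String) (existing_ids : List String) : String :=
  if existing_ids.contains prefix_ = false then
    prefix_
  else
    let tag := prefix_ ++ "_"
    let used : PySem.Set String :=
      PySem.Set.ofList (existing_ids.filterMap (fun s =>
        if PySem.Str.startswith s tag then
          some (PySem.Str.slice s (some (PySem.Str.len tag)) none)
        else none))
    create_unique_id_free_id tag used (existing_ids.length + 1) 1

-- ===== PRECONDITION & SPEC =====
def Spec_create_unique_id (prefix_ : String) (existing_ids : List String) (out : String) : Prop := out = create_unique_id_alt prefix_ existing_ids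
instance (prefix_ : String) (existing_ids : List String) (out : String) : Decidable (Spec_create_unique_id prefix_ existing_ids out) := by unfold Spec_create_unique_id; infer_instance

-- ===== CLAIM (what is proved, stated in full; the proofs are below) =====
def Claim_equal_create_unique_id : Prop := ∀ (prefix_ : String) (existing_ids : List String), Dom_create_unique_id prefix_ existing_ids → Spec_create_unique_id prefix_ existing_ids (create_unique_id prefix_ existing_ids)

-- ===== LEMMAS AND PROOFS =====

-- The comprehension's filter/slice extracts exactly x from tag ++ x.
theorem extract_eq_some_iff (tag s x : String) :
    (if PySem.Str.startswith s tag then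
        some (PySem.Str.slice s (some (PySem.Str.len tag)) none)
      else none) = some x ↔ s = tag ++ x := by
  constructor
  · intro h
    by_cases hsw : PySem.Str.startswith s tag
    · rw [if_pos hsw] at h
      have hx := Option.some.inj h
      have hpre : tag.toList <+: s.toList :=
        (PySem.Chars.startswith_iff s.toList tag.toList).mp
          (by simpa [PySem.Str.startswith] using hsw)
      obtain ⟨t, ht⟩ := hpre
      apply String.toList_inj.mp
      rw [String.toList_append, ← ht]
      have : x.toList = s.toList.drop tag.toList.length := by
        rw [← hx, PySem.Str.toList_slice, PySem.Chars.slice_eq_listSlice,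
          show PySem.Str.len tag = ((tag.toList.length : Nat) : Int) by
            simp [PySem.Str.len],
          PySem.List.slice_from_natCast]
      rw [this, ← ht, List.drop_left]
    · rw [if_neg hsw] at h; exact absurd h (by simp)
  · intro h
    subst h
    have hsw : PySem.Str.startswith (tag ++ x) tag = true := by
      simp only [PySem.Str.startswith]
      exact (PySem.Chars.startswith_iff _ _).mpr
        (by rw [String.toList_append]; exact List.prefix_append _ _)
    rw [if_pos hsw]
    congr 1
    apply String.toList_inj.mp
    rw [PySem.Str.toList_slice, PySem.Chars.slice_eq_listSlice,
      show PySem.Str.len tag = ((tag.toList.length : Nat) : Int) by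
        simp [PySem.Str.len],
      PySem.List.slice_from_natCast, String.toList_append, List.drop_left]

-- Membership in the extracted-suffix set equals membership of the formatted id in existing_ids.
theorem contains_used_eq (tag : String) (existing_ids : List String) (x : String) :
    PySem.Set.contains
      (PySem.Set.ofList (existing_ids.filterMap (fun s =>
        if PySem.Str.startswith s tag then
          some (PySem.Str.slice s (some (PySem.Str.len tag)) none)
        else none))) x
      = existing_ids.contains (tag ++ x) := by
  simp only [PySem.Set.contains]
  rw [Bool.eq_iff_iff]
  simp only [List.contains_iff_mem, PySem.Set.mem_ofList, List.mem_filterMap]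
  constructor
  · rintro ⟨s, hs, hf⟩
    rwa [(extract_eq_some_iff tag s x).mp hf] at hs
  · intro h
    exact ⟨tag ++ x, h, (extract_eq_some_iff tag (tag ++ x) x).mpr rfl⟩

-- The two loops agree step for step (same fuel, same suffix counter).
theorem loop_eq_free_id (prefix_ : String) (existing_ids : List String) :
    ∀ (fuel : Nat) (k : Int),
      create_unique_id_loop prefix_ existing_ids fuel k =
        create_unique_id_free_id (prefix_ ++ "_")
          (PySem.Set.ofList (existing_ids.filterMap (fun s =>
            if PySem.Str.startswith s (prefix_ ++ "_") then
              some (PySem.Str.slice s (some (PySem.Str.len (prefix_ ++ "_"))) none)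
            else none))) fuel k := by
  intro fuel
  induction fuel with
  | zero => intro k; rfl
  | succ n ih =>
      intro k
      simp only [create_unique_id_loop, create_unique_id_free_id,
        contains_used_eq (prefix_ ++ "_") existing_ids (PySem.Int.toStr k)]
      by_cases h : existing_ids.contains ((prefix_ ++ "_") ++ PySem.Int.toStr k)
      · rw [if_pos (by simpa [String.append_assoc] using h), if_neg (by simpa [List.contains_iff_mem] using h), ih]
      · rw [if_neg (by simpa [String.append_assoc] using h), if_pos (by simpa [List.contains_iff_mem] using h),
          String.append_assoc]

-- ===== VERDICT (by name: the statement is the Claim_ definition above) =====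
theorem create_unique_id_spec : Claim_equal_create_unique_id := by
  intro prefix_ existing_ids _
  unfold Spec_create_unique_id create_unique_id create_unique_id_alt
  by_cases h : existing_ids.contains prefix_
  · rw [if_pos h, if_neg (by simpa [List.contains_iff_mem] using h)]
    exact loop_eq_free_id prefix_ existing_ids _ 1
  · rw [if_neg h, if_pos (by simpa [List.contains_iff_mem] using h)]
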